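-- pv_equiv track=rewrite | github.com/miztiik/yen-go | tools/puzzle-enrichment-lab/analyzers/frames_gp.py | _flip_stones
-- ===== SOURCE A (Python) =====
-- def _flip_stones(
--     stones: list[list[dict]],
--     flip_spec: tuple[bool, bool, bool],
-- ) -> list[list[dict]]:
--     """Flip/swap the board grid according to flip_spec = (flip_i, flip_j, swap)."""
--     flip_i, flip_j, swap = flip_spec
--     isize, jsize = _ij_sizes(stones)
--     new_isize = jsize if swap else isize
--     new_jsize = isize if swap else jsize
--     new_stones: list[list[dict]] = [
--         [{} for _ in range(new_jsize)] for _ in range(new_isize)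
--     ]
--     for i, row in enumerate(stones):
--         for j, cell in enumerate(row):
--             ni, nj = _flip_ij(i, j, isize, jsize, flip_spec)
--             new_stones[ni][nj] = cell
--     return new_stones
--
-- def _flip_ij(
--     i: int, j: int,
--     isize: int, jsize: int,
--     flip_spec: tuple[bool, bool, bool],
-- ) -> tuple[int, int]:
--     flip_i, flip_j, swap = flip_spec
--     fi = (isize - 1 - i) if flip_i else i
--     fj = (jsize - 1 - j) if flip_j else j
--     return (fj, fi) if swap else (fi, fj)
--
-- def _ij_sizes(stones: list[list[dict]]) -> tuple[int, int]:
--     return (len(stones), len(stones[0]) if stones else 0)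
-- ===== SOURCE B (Python) =====
-- def _flip_stones(
--     stones: list[list[dict]],
--     flip_spec: tuple[bool, bool, bool],
-- ) -> list[list[dict]]:
--     """Flip/swap the board grid by whole-structure reversal and transposition."""
--     flip_i, flip_j, swap = flip_spec
--     width = len(stones[0]) if stones else 0
--     g = stones[::-1] if flip_i else stones
--     g = [row[:width] + [{} for _ in range(width - len(row))] for row in g]
--     if flip_j:
--         g = [row[::-1] for row in g]
--     if swap:
--         return [list(col) for col in zip(*g)]
--     return g
-- ===== Notes on version B (the rewrite author's own statement) =====
-- stated objective: idiomatic
-- what changed: Replaces the per-cell index arithmetic and scatter into a preallocated grid by whole-structure operations: normalize each row to the first row's width (pad with {}), reverse the outer list for flip_i, reverse each row for flip_j, and transpose with zip(*g) for swap. Pre_ excludes grids with a row longer than the first, on which A either raises IndexError or scatters through negative-index wraparound while B truncates the extra cells.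
import Mathlib
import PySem

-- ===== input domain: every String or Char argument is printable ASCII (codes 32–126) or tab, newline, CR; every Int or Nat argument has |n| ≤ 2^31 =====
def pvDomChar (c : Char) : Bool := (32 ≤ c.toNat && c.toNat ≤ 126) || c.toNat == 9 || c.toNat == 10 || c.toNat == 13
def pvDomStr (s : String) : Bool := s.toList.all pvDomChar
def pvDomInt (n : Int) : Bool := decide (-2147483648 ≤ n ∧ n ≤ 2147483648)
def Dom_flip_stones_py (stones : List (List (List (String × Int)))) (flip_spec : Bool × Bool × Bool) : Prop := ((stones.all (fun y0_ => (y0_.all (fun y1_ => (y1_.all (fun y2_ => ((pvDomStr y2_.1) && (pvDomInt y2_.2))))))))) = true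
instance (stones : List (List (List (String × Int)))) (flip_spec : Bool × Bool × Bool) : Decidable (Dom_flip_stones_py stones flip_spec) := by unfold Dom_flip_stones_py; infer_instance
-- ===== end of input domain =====

-- B replaces A's per-cell index arithmetic and scatter into a preallocated grid by
-- whole-structure operations (reverse outer list, reverse rows, transpose); same cost.
-- Equivalence is about the return value; neither program mutates its arguments.

-- ===== PORT A =====
-- Python: new_stones[ni][nj] = cell  (one negative-index wrap per Python; an index
-- that is still out of range raises IndexError in Python — those inputs are outside Pre_).
def pySetCell (g : List (List (List (String × Int)))) (ni nj : Int)
    (v : List (String × Int)) : List (List (List (String × Int))) :=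
  let p : Int := if ni < 0 then ni + g.length else ni
  if p < 0 then g
  else g.modify p.toNat (fun row =>
    let q : Int := if nj < 0 then nj + row.length else nj
    if q < 0 then row else row.set q.toNat v)

def flip_stones_py (stones : List (List (List (String × Int)))) (flip_spec : Bool × Bool × Bool) : List (List (List (String × Int))) :=
  match flip_spec with
  | (flip_i, flip_j, swap) =>
    let isize : Int := stones.length
    let jsize : Int := (stones.headD []).length
    let new_isize : Int := if swap then jsize else isize
    let new_jsize : Int := if swap then isize else jsize
    let init : List (List (List (String × Int))) :=
      List.replicate new_isize.toNat (List.replicate new_jsize.toNat [])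
    (PySem.List.enumerate stones).foldl (fun grid p =>
      (PySem.List.enumerate p.2).foldl (fun grid q =>
        let fi : Int := if flip_i then isize - 1 - p.1 else p.1
        let fj : Int := if flip_j then jsize - 1 - q.1 else q.1
        let nn : Int × Int := if swap then (fj, fi) else (fi, fj)
        pySetCell grid nn.1 nn.2 q.2) grid) init

-- ===== PORT B =====
-- zip(*g): truncates to the shortest row; [] when g = []
def pyZipT (g : List (List (List (String × Int)))) : List (List (List (String × Int))) :=
  match g with
  | [] => []
  | r :: rs =>
    let m := rs.foldl (fun a row => min a row.length) r.length
    (List.range m).map (fun q => (r :: rs).map (fun row => row.getD q []))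

def flip_stones_py_alt (stones : List (List (List (String × Int)))) (flip_spec : Bool × Bool × Bool) : List (List (List (String × Int))) :=
  match flip_spec with
  | (flip_i, flip_j, swap) =>
    let width := (stones.headD []).length
    let g1 := if flip_i then stones.reverse else stones
    let g2 := g1.map (fun row => row.take width ++ List.replicate (width - row.length) [])
    let g := if flip_j then g2.map (fun row => row.reverse) else g2
    if swap then pyZipT g else g

-- ===== PRECONDITION & SPEC =====
-- Pre_ excludes grids with a row longer than the first row, on which A either raises
-- IndexError or scatters through negative-index wraparound while B truncates the extra cells.
def Pre_flip_stones_py (stones : List (List (List (String × Int)))) (flip_spec : Bool × Bool × Bool) : Prop :=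
  ∀ r ∈ stones, r.length ≤ (stones.headD []).length
instance (stones : List (List (List (String × Int)))) (flip_spec : Bool × Bool × Bool) : Decidable (Pre_flip_stones_py stones flip_spec) := by unfold Pre_flip_stones_py; infer_instance

def pvWitness_flip_stones_py : (List (List (List (String × Int)))) × (Bool × Bool × Bool) :=
  ([[[("a", 1)], [("b", 2)]], [[("c", 3)], []]], (true, false, true))

def Spec_flip_stones_py (stones : List (List (List (String × Int)))) (flip_spec : Bool × Bool × Bool) (out : List (List (List (String × Int)))) : Prop := out = flip_stones_py_alt stones flip_spec
instance (stones : List (List (List (String × Int)))) (flip_spec : Bool × Bool × Bool) (out : List (List (List (String × Int)))) : Decidable (Spec_flip_stones_py stones flip_spec out) := by unfold Spec_flip_stones_py; infer_instance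

-- ===== CLAIM (what is proved, stated in full; the proofs are below) =====
def Claim_equal_flip_stones_py : Prop := ∀ (stones : List (List (List (String × Int)))) (flip_spec : Bool × Bool × Bool), Dom_flip_stones_py stones flip_spec → Pre_flip_stones_py stones flip_spec → Spec_flip_stones_py stones flip_spec (flip_stones_py stones flip_spec)

-- ===== LEMMAS AND PROOFS =====

-- pySetCell with nonnegative indices is modify-then-set.
theorem pySetCell_nonneg (g : List (List (List (String × Int)))) (ni nj : Int)
    (v : List (String × Int)) (h1 : 0 ≤ ni) (h2 : 0 ≤ nj) :
    pySetCell g ni nj v = g.modify ni.toNat (fun r => r.set nj.toNat v) := by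
  simp [pySetCell, not_lt.2 h1, not_lt.2 h2]

theorem fold_modify {α β : Type} (k : Nat) (h : β → α → α) :
    ∀ (L : List β) (G : List α),
    L.foldl (fun g q => g.modify k (h q)) G = G.modify k (fun r => L.foldl (fun r q => h q r) r) := by
  intro L
  induction L with
  | nil =>
    intro G
    simp only [List.foldl_nil]
    apply List.ext_getElem
    · simp
    · intro i h1 h2; rw [List.getElem_modify]; simp
  | cons x L ih =>
    intro G
    simp only [List.foldl_cons]
    rw [ih, List.modify_modify_eq]
    rfl

theorem mscatter_id {α β : Type} (f : β → α → α) :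
    ∀ (xs : List β) (s : Nat) (base : List α), s + xs.length ≤ base.length →
    (PySem.List.enumerate xs (s : Int)).foldl (fun b q => b.modify q.1.toNat (f q.2)) base
    = base.take s ++ List.zipWith (fun v r => f v r) xs (base.drop s) ++ base.drop (s + xs.length) := by
  intro xs
  induction xs with
  | nil => intro s base h; simp
  | cons x xs ih =>
    intro s base h
    have hs : s < base.length := by simp at h; omega
    rw [PySem.List.enumerate_cons]
    simp only [List.foldl_cons]
    have hmod : base.modify (s : Int).toNat (f x) = base.set s (f x base[s]) := by
      rw [Int.toNat_natCast, List.modify_eq_set_get _ hs]; rfl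
    have hcast : ((s : Int) + 1) = ((s + 1 : Nat) : Int) := by push_cast; ring
    rw [hmod, hcast, ih (s+1) (base.set s (f x base[s])) (by simp at h ⊢; omega)]
    have hdropc : base.drop s = base[s] :: base.drop (s+1) := List.drop_eq_getElem_cons hs
    have h1 : (base.set s (f x base[s])).take (s+1) = base.take s ++ [f x base[s]] := by
      apply List.ext_getElem
      · simp; omega
      · intro i h₁ h₂
        have hi' : i < s + 1 := by simp at h₁; omega
        simp only [List.getElem_take, List.getElem_set]
        by_cases hi : i = s
        · subst hi; simp [List.getElem_append_right, List.length_take]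
        · have hlt : i < s := by omega
          rw [List.getElem_append_left (by simp; omega)]
          simp [List.getElem_take]; omega
    have h2 : (base.set s (f x base[s])).drop (s+1) = base.drop (s+1) := by
      rw [List.drop_set]; simp
    have h3 : (base.set s (f x base[s])).drop (s+1+xs.length) = base.drop (s+1+xs.length) := by
      rw [List.drop_set]; simp; omega
    rw [h1, h2, h3, hdropc]
    simp only [List.zipWith_cons_cons, List.append_assoc, List.cons_append, List.nil_append]
    have : s + 1 + xs.length = s + (xs.length + 1) := by omega
    rw [this]
    rfl


theorem zipWith_take_len {α β γ : Type} (f : β → α → γ) :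
    ∀ (l : List β) (t : List α), List.zipWith f l (t.take l.length) = List.zipWith f l t := by
  intro l
  induction l with
  | nil => intro t; simp
  | cons x l ih =>
    intro t
    cases t with
    | nil => simp
    | cons a t => simpa using ih t

theorem mscatter_rev {α β : Type} (f : β → α → α) (N : Nat) :
    ∀ (xs : List β) (s : Nat) (base : List α), base.length = N → s + xs.length ≤ N →
    (PySem.List.enumerate xs (s : Int)).foldl (fun b q => b.modify ((N : Int) - 1 - q.1).toNat (f q.2)) base
    = base.take (N - s - xs.length)
      ++ List.zipWith (fun v r => f v r) xs.reverse (base.drop (N - s - xs.length))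
      ++ base.drop (N - s) := by
  intro xs
  induction xs with
  | nil =>
    intro s base hN h
    simp
  | cons x xs ih =>
    intro s base hN h
    have hlen : s + (xs.length + 1) ≤ N := by simpa using h
    set k := N - 1 - s with hkdef
    have hk : k < base.length := by omega
    have hkN : ((N : Int) - 1 - (s : Int)).toNat = k := by omega
    rw [PySem.List.enumerate_cons]
    simp only [List.foldl_cons]
    have hmod : base.modify ((N:Int) - 1 - (s:Int)).toNat (f x)
        = base.set k (f x base[k]) := by
      rw [hkN, List.modify_eq_set_get _ hk]; rfl
    have hcast : ((s : Int) + 1) = ((s + 1 : Nat) : Int) := by push_cast; ring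
    set base' := base.set k (f x base[k]) with hb'
    rw [hmod, hcast, ih (s+1) base' (by simp [hb', hN]) (by omega)]
    set d := N - s - (xs.length + 1) with hd
    have hd1 : N - (s+1) - xs.length = d := by omega
    have hd2 : d + xs.length = k := by omega
    have hd3 : N - (s+1) = k := by omega
    have hNs : N - s = k + 1 := by omega
    have hdropk : base.drop k = base[k] :: base.drop (k+1) := List.drop_eq_getElem_cons hk
    have h1 : base'.take d = base.take d := by
      rw [hb', List.take_set, List.set_eq_of_length_le (by simp; omega)]
    have h2 : base'.drop k = f x base[k] :: base.drop (k+1) := by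
      rw [hb', List.drop_set, if_neg (lt_irrefl k), hdropk]
      simp only [Nat.sub_self, List.set_cons_zero]
    have h3 : List.zipWith (fun v r => f v r) xs.reverse (base'.drop d)
        = List.zipWith (fun v r => f v r) xs.reverse (base.drop d) := by
      rw [← zipWith_take_len _ xs.reverse (base'.drop d), ← zipWith_take_len _ xs.reverse (base.drop d)]
      congr 1
      rw [hb', List.drop_set, if_neg (by omega : ¬ k < d), List.take_set,
        List.set_eq_of_length_le (by simp; omega)]
    rw [hd1, hd3, h1, h2, h3]
    -- RHS: take d ++ zipWith (xs.reverse ++ [x]) (base.drop d) ++ base.drop (N - s)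
    have hsplitbase : base.drop d = (base.drop d).take xs.length ++ base.drop k := by
      have : (base.drop d).drop xs.length = base.drop k := by
        rw [List.drop_drop]; congr 1; try omega
      rw [← this, List.take_append_drop]
    have hlen1 : xs.reverse.length = ((base.drop d).take xs.length).length := by
      simp; omega
    have hzr : List.zipWith (fun v r => f v r) (xs.reverse ++ [x]) (base.drop d)
        = List.zipWith (fun v r => f v r) xs.reverse (base.drop d) ++ [f x base[k]] := by
      conv_lhs => rw [hsplitbase]
      rw [List.zipWith_append hlen1, hdropk]
      rw [← zipWith_take_len _ xs.reverse (base.drop d)]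
      simp only [List.length_reverse]
      rfl
    simp only [List.reverse_cons, List.length_cons]
    rw [← hd, hzr, hNs]
    simp [List.append_assoc]

theorem minfold_const (m : Nat) :
    ∀ (rs : List (List (List (String × Int)))), (∀ r ∈ rs, r.length = m) →
    rs.foldl (fun a row => min a row.length) m = m := by
  intro rs
  induction rs with
  | nil => intro _; rfl
  | cons r rs ih =>
    intro h
    have hr : r.length = m := h r (by simp)
    simpa [hr] using ih (fun x hx => h x (by simp [hx]))


-- fold with a step that, on list members and invariant states, equals another step
theorem foldl_hom_of_inv {σ β : Type} (P : σ → Prop) (f g : σ → β → σ) :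
    ∀ (l : List β) (init : σ), P init → (∀ s x, x ∈ l → P s → P (g s x)) →
    (∀ s x, x ∈ l → P s → f s x = g s x) → l.foldl f init = l.foldl g init := by
  intro l
  induction l with
  | nil => intro init _ _ _; rfl
  | cons x l ih =>
    intro init hP hpres heq
    simp only [List.foldl_cons]
    rw [heq init x (by simp) hP]
    exact ih (g init x) (hpres init x (by simp) hP)
      (fun s y hy hs => hpres s y (by simp [hy]) hs)
      (fun s y hy hs => heq s y (by simp [hy]) hs)


theorem zipWith_fst {α β γ : Type} (g : β → γ) :
    ∀ (xs : List β) (l : List α), xs.length ≤ l.length →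
    List.zipWith (fun v (_ : α) => g v) xs l = xs.map g := by
  intro xs
  induction xs with
  | nil => intro l _; simp
  | cons x xs ih =>
    intro l hl
    cases l with
    | nil => simp at hl
    | cons a l => simpa using ih l (by simpa using hl)

-- inner loop of A, no swap: all writes land in row P, fully overwriting it
-- the value row i of A writes into output row FI(i), as a function of the old row
def rowPatch (fj : Bool) (m : Nat) (row b : List (List (String × Int))) : List (List (String × Int)) :=
  if fj then b.take (m - row.length) ++ row.reverse else row ++ b.drop row.length

-- the value A's swap case leaves at output position (p, column of row r)
def midv (fj : Bool) (m : Nat) (row : List (List (String × Int))) (p : Nat) : List (String × Int) :=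
  if fj then row.getD (m - 1 - p) [] else row.getD p []

theorem zipWith_replicate_right {α β γ : Type} (f : β → α → γ) :
    ∀ (xs : List β) (k : Nat) (c : α), xs.length ≤ k →
    List.zipWith f xs (List.replicate k c) = xs.map (fun x => f x c) := by
  intro xs
  induction xs with
  | nil => intro k c _; simp
  | cons x xs ih =>
    intro k c hk
    cases k with
    | zero => simp at hk
    | succ k => simpa [List.replicate_succ] using ih k c (by simpa using hk)

theorem rowPatch_length (fj : Bool) (m : Nat) (row b : List (List (String × Int)))
    (hrow : row.length ≤ m) (hb : b.length = m) : (rowPatch fj m row b).length = m := by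
  cases fj <;> simp [rowPatch] <;> omega

theorem getD_oob {α : Type} (l : List α) (i : Nat) (d : α) (h : l.length ≤ i) :
    l.getD i d = d := by
  rw [List.getD_eq_getElem?_getD, List.getElem?_eq_none (by omega)]
  rfl

theorem getD_set_ne {α : Type} (l : List α) (i c : Nat) (x : α) (d : α) (h : c ≠ i) :
    (l.set i x).getD c d = l.getD c d := by
  rw [List.getD_eq_getElem?_getD, List.getD_eq_getElem?_getD,
    List.getElem?_set_ne (by omega)]

theorem getD_replicate_self {α : Type} (n c : Nat) (d : α) :
    (List.replicate n d).getD c d = d := by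
  rcases Nat.lt_or_ge c n with h | h
  · rw [List.getD_eq_getElem _ _ (by simpa using h), List.getElem_replicate]
  · exact getD_oob _ _ _ (by simpa using h)

theorem set_getD_self {α : Type} (l : List α) (i : Nat) (d : α) (h : l.getD i d = d) :
    l.set i d = l := by
  apply List.ext_getElem
  · simp
  · intro j h1 h2
    rw [List.getElem_set]
    split
    · next heq => subst heq; rw [← List.getD_eq_getElem l d h2, h]
    · rfl

theorem norm_length (r : List (List (String × Int))) (m : Nat) (hr : r.length ≤ m) :
    (r.take m ++ List.replicate (m - r.length) ([] : List (String × Int))).length = m := by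
  simp; omega

theorem norm_getD (r : List (List (String × Int))) (m p : Nat) (hr : r.length ≤ m) (hp : p < m) :
    (r.take m ++ List.replicate (m - r.length) ([] : List (String × Int))).getD p []
    = r.getD p [] := by
  rw [List.take_of_length_le hr]
  rcases Nat.lt_or_ge p r.length with h | h
  · rw [List.getD_eq_getElem _ _ (by simp; omega), List.getElem_append_left h,
      List.getD_eq_getElem _ _ h]
  · rw [List.getD_eq_getElem _ _ (by simp; omega),
      List.getElem_append_right (by simpa using h), List.getElem_replicate, getD_oob _ _ _ h]

-- inner loop of A, no swap: all writes land in row P, patching it with row's cells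
theorem inner_noswap (fj : Bool) (m : Nat) (P : Int) (hP : 0 ≤ P)
    (row : List (List (String × Int))) (hrow : row.length ≤ m)
    (G : List (List (List (String × Int)))) (hG : ∀ r ∈ G, r.length = m) :
    (PySem.List.enumerate row).foldl
      (fun grid q => pySetCell grid P (if fj then (m : Int) - 1 - q.1 else q.1) q.2) G
    = G.modify P.toNat (rowPatch fj m row) := by
  rw [PySem.List.foldl_congr_mem _ _
      (fun grid q => grid.modify P.toNat (fun r => r.set (if fj then (m : Int) - 1 - q.1 else q.1).toNat q.2)) _
      (by
        intro acc x hx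
        rw [PySem.List.mem_enumerate_iff] at hx
        obtain ⟨k, hk, rfl⟩ := hx
        apply pySetCell_nonneg _ _ _ _ hP
        cases fj <;> simp <;> omega)]
  rw [fold_modify]
  by_cases hPG : P.toNat < G.length
  · rw [List.modify_eq_set_get _ hPG, List.modify_eq_set_get _ hPG]
    congr 1
    have hbase : (G.get ⟨P.toNat, hPG⟩).length = m := hG _ (List.getElem_mem hPG)
    have h0 : (0 : Int) = ((0 : Nat) : Int) := rfl
    cases fj
    · simp only [Bool.false_eq_true, if_false]
      rw [h0, PySem.List.foldl_congr_mem _ _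
          (fun r q => r.modify q.1.toNat ((fun v _ => v) q.2)) _ (by
            intro acc x _; rw [List.set_eq_modify])]
      rw [mscatter_id (fun v _ => v) row 0 _ (by simp at hbase ⊢; omega)]
      simp only [List.take_zero, Nat.zero_add, List.nil_append, List.drop_zero]
      rw [zipWith_fst (fun v => v) row _ (by simp at hbase ⊢; omega)]
      simp [rowPatch]
    · simp only [if_true]
      rw [h0, PySem.List.foldl_congr_mem _ _
          (fun r q => r.modify ((m : Int) - 1 - q.1).toNat ((fun v _ => v) q.2)) _ (by
            intro acc x _; rw [List.set_eq_modify])]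
      rw [mscatter_rev (fun v _ => v) m row 0 _ (by simp at hbase ⊢; omega) (by omega)]
      have hm0 : m - 0 - row.length = m - row.length := by omega
      rw [hm0]
      simp only [Nat.sub_zero]
      rw [zipWith_fst (fun v => v) row.reverse _ (by simp at hbase ⊢; omega)]
      have hdrop : (G.get ⟨P.toNat, hPG⟩).drop m = [] := by
        apply List.drop_eq_nil_of_le; simp at hbase ⊢; omega
      rw [hdrop]
      simp [rowPatch]
  · rw [List.modify_eq_self (by omega), List.modify_eq_self (by omega)]

-- inner loop of A, swap: the write row varies with j, the column C is fixed
theorem inner_swap (fj : Bool) (m : Nat) (C : Int) (hC : 0 ≤ C)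
    (row : List (List (String × Int))) (hrow : row.length ≤ m)
    (G : List (List (List (String × Int)))) (hG : G.length = m) :
    (PySem.List.enumerate row).foldl
      (fun grid q => pySetCell grid (if fj then (m : Int) - 1 - q.1 else q.1) C q.2) G
    = if fj then
        G.take (m - row.length)
          ++ List.zipWith (fun v r => r.set C.toNat v) row.reverse (G.drop (m - row.length))
      else
        List.zipWith (fun v r => r.set C.toNat v) row G ++ G.drop row.length := by
  have hconv : ∀ (acc : List (List (List (String × Int)))), ∀ x ∈ PySem.List.enumerate row,
      pySetCell acc (if fj then (m : Int) - 1 - x.1 else x.1) C x.2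
      = acc.modify (if fj then (m : Int) - 1 - x.1 else x.1).toNat ((fun v r => r.set C.toNat v) x.2) := by
    intro acc x hx
    rw [PySem.List.mem_enumerate_iff] at hx
    obtain ⟨k, hk, rfl⟩ := hx
    apply pySetCell_nonneg _ _ _ _ _ hC
    cases fj <;> simp <;> omega
  rw [PySem.List.foldl_congr_mem _ _ _ _ hconv]
  have h0 : (0 : Int) = ((0 : Nat) : Int) := rfl
  cases fj
  · simp only [Bool.false_eq_true, if_false]
    have hms := mscatter_id (fun v r => r.set C.toNat v) row 0 G (by omega)
    beta_reduce at hms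
    rw [h0, hms]
    simp
  · simp only [if_true]
    have hms := mscatter_rev (fun v r => r.set C.toNat v) m row 0 G hG (by omega)
    beta_reduce at hms
    rw [h0, hms]
    have hdropm : G.drop (m - 0) = [] := List.drop_eq_nil_of_le (by omega)
    rw [hdropm]
    simp

-- outer loop of A, no swap: row i of stones patches output row FI(i)
theorem outer_noswap (fi fj : Bool) (m N : Nat)
    (rows : List (List (List (String × Int)))) (s : Nat) (G : List (List (List (String × Int))))
    (hrows : ∀ r ∈ rows, r.length ≤ m) (hG : ∀ r ∈ G, r.length = m) (hGN : G.length = N)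
    (hsN : s + rows.length ≤ N) :
    (PySem.List.enumerate rows (s : Int)).foldl
      (fun grid p => (PySem.List.enumerate p.2).foldl
        (fun grid q => pySetCell grid
          (if fi then (N : Int) - 1 - p.1 else p.1)
          (if fj then (m : Int) - 1 - q.1 else q.1) q.2) grid) G
    = if fi then
        G.take (N - s - rows.length)
          ++ List.zipWith (fun v r => rowPatch fj m v r) rows.reverse (G.drop (N - s - rows.length))
          ++ G.drop (N - s)
      else
        G.take s ++ List.zipWith (fun v r => rowPatch fj m v r) rows (G.drop s)
          ++ G.drop (s + rows.length) := by
  rw [foldl_hom_of_inv (fun G => (∀ r ∈ G, r.length = m) ∧ G.length = N) _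
      (fun grid p => grid.modify (if fi then (N : Int) - 1 - p.1 else p.1).toNat
        ((fun row => rowPatch fj m row) p.2))
      _ G ⟨hG, hGN⟩
      (by
        intro g x hx hg
        obtain ⟨hg1, hg2⟩ := hg
        rw [PySem.List.mem_enumerate_iff] at hx
        obtain ⟨k, hk, rfl⟩ := hx
        have hx2 : rows[k].length ≤ m := hrows _ (List.getElem_mem hk)
        constructor
        · intro r hr
          beta_reduce at hr
          by_cases hi : (if fi then (N : Int) - 1 - ((s : Int) + k) else (s : Int) + k).toNat < g.length
          · rw [List.modify_eq_set_get _ hi] at hr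
            rcases List.mem_or_eq_of_mem_set hr with h | h
            · exact hg1 r h
            · subst h
              exact rowPatch_length fj m _ _ hx2 (hg1 _ (List.getElem_mem hi))
          · rw [List.modify_eq_self (by omega)] at hr
            exact hg1 r hr
        · simp [hg2])
      (by
        intro g x hx hg
        obtain ⟨hg1, hg2⟩ := hg
        rw [PySem.List.mem_enumerate_iff] at hx
        obtain ⟨k, hk, rfl⟩ := hx
        have hx2 : rows[k].length ≤ m := hrows _ (List.getElem_mem hk)
        have hP : 0 ≤ (if fi then (N : Int) - 1 - ((s : Int) + k) else (s : Int) + k) := by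
          cases fi <;> simp <;> omega
        exact inner_noswap fj m _ hP rows[k] hx2 g hg1)]
  cases fi
  · simp only [Bool.false_eq_true, if_false]
    have hms := mscatter_id (fun (row b : List (List (String × Int))) => rowPatch fj m row b)
      rows s G (by omega)
    beta_reduce at hms
    rw [hms]
  · simp only [if_true]
    have hms := mscatter_rev (fun (row b : List (List (String × Int))) => rowPatch fj m row b)
      N rows s G hGN (by omega)
    beta_reduce at hms
    rw [hms]

theorem set_take_succ {α : Type} (l : List α) (i : Nat) (x : α) (h : i < l.length) :
    (l.set i x).take (i+1) = l.take i ++ [x] := by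
  apply List.ext_getElem
  · simp; omega
  · intro t h₁ h₂
    have ht : t < i + 1 := by simp at h₁; omega
    simp only [List.getElem_take, List.getElem_set]
    by_cases hti : t = i
    · subst hti; simp [List.getElem_append_right, List.length_take]
    · have hlt : t < i := by omega
      rw [List.getElem_append_left (by simp; omega)]
      simp [List.getElem_take]
      omega

theorem range_map_getD (G : List (List (List (String × Int)))) (m : Nat) (h : G.length = m) :
    (List.range m).map (fun p => G.getD p []) = G := by
  apply List.ext_getElem
  · simp [h]
  · intro i h1 h2
    simp only [List.getElem_map, List.getElem_range]
    rw [List.getD_eq_getElem]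

-- one swap-case outer step updates one column of every output row
theorem colstep_getD (fj : Bool) (m n : Nat) (C : Int) (hC0 : 0 ≤ C) (hCn : C.toNat < n)
    (row : List (List (String × Int))) (hrow : row.length ≤ m)
    (G : List (List (List (String × Int)))) (hGm : G.length = m)
    (hGn : ∀ r ∈ G, r.length = n)
    (hblank : ∀ p, p < m → (G.getD p []).getD C.toNat [] = [])
    (p : Nat) (hp : p < m) :
    ((if fj then
        G.take (m - row.length)
          ++ List.zipWith (fun v r => r.set C.toNat v) row.reverse (G.drop (m - row.length))
      else
        List.zipWith (fun v r => r.set C.toNat v) row G ++ G.drop row.length) : List (List (List (String × Int)))).getD p []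
    = (G.getD p []).set C.toNat (midv fj m row p) := by
  have hpG : p < G.length := by omega
  cases fj
  · simp only [Bool.false_eq_true, if_false, midv]
    have hzl : (List.zipWith (fun v r => r.set C.toNat v) row G).length = row.length := by
      simp; omega
    rcases Nat.lt_or_ge p row.length with h | h
    · rw [List.getD_eq_getElem?_getD, List.getElem?_append_left (by omega),
        List.getElem?_zipWith, List.getElem?_eq_getElem h, List.getElem?_eq_getElem hpG]
      rw [List.getD_eq_getElem _ _ hpG, List.getD_eq_getElem _ _ h]
      rfl
    · rw [List.getD_eq_getElem?_getD, List.getElem?_append_right (by omega), hzl,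
        List.getElem?_drop, (by omega : row.length + (p - row.length) = p),
        List.getElem?_eq_getElem hpG]
      rw [getD_oob _ _ _ h, set_getD_self _ _ _ (hblank p hp), List.getD_eq_getElem _ _ hpG]
      rfl
  · simp only [if_true, midv]
    have htl : (G.take (m - row.length)).length = m - row.length := by simp; omega
    rcases Nat.lt_or_ge p (m - row.length) with h | h
    · rw [List.getD_eq_getElem?_getD, List.getElem?_append_left (by omega),
        List.getElem?_take_of_lt h, List.getElem?_eq_getElem hpG]
      rw [getD_oob row _ _ (by omega), set_getD_self _ _ _ (hblank p hp),
        List.getD_eq_getElem _ _ hpG]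
      rfl
    · have hrl : p - (m - row.length) < row.length := by omega
      rw [List.getD_eq_getElem?_getD, List.getElem?_append_right (by omega), htl,
        List.getElem?_zipWith, List.getElem?_reverse hrl, List.getElem?_drop,
        (by omega : m - row.length + (p - (m - row.length)) = p),
        (by omega : row.length - 1 - (p - (m - row.length)) = m - 1 - p),
        List.getElem?_eq_getElem hpG,
        List.getElem?_eq_getElem (by omega : m - 1 - p < row.length)]
      rw [List.getD_eq_getElem _ _ hpG, List.getD_eq_getElem _ _ (by omega : m - 1 - p < row.length)]
      rfl

theorem colstep_shape (fj : Bool) (m n : Nat) (C : Int)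
    (row : List (List (String × Int))) (hrow : row.length ≤ m)
    (G : List (List (List (String × Int)))) (hGm : G.length = m)
    (hGn : ∀ r ∈ G, r.length = n) :
    ((if fj then
        G.take (m - row.length)
          ++ List.zipWith (fun v r => r.set C.toNat v) row.reverse (G.drop (m - row.length))
      else
        List.zipWith (fun v r => r.set C.toNat v) row G ++ G.drop row.length) : List (List (List (String × Int)))).length = m
    ∧ ∀ r ∈ (if fj then
        G.take (m - row.length)
          ++ List.zipWith (fun v r => r.set C.toNat v) row.reverse (G.drop (m - row.length))
      else
        List.zipWith (fun v r => r.set C.toNat v) row G ++ G.drop row.length), r.length = n := by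
  constructor
  · cases fj <;> simp <;> omega
  · intro r hr
    cases fj
    · simp only [Bool.false_eq_true, if_false] at hr
      rcases List.mem_append.mp hr with h | h
      · rw [List.mem_iff_getElem] at h
        obtain ⟨p, hp, rfl⟩ := h
        rw [List.getElem_zipWith, List.length_set]
        exact hGn _ (List.getElem_mem _)
      · exact hGn _ (List.mem_of_mem_drop h)
    · simp only [if_true] at hr
      rcases List.mem_append.mp hr with h | h
      · exact hGn _ (List.mem_of_mem_take h)
      · rw [List.mem_iff_getElem] at h
        obtain ⟨p, hp, rfl⟩ := h
        rw [List.getElem_zipWith, List.length_set]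
        exact hGn _ (List.mem_of_mem_drop (List.getElem_mem _))

-- outer loop of A, swap, flip_i = false
theorem zipfold_id (fj : Bool) (m n : Nat) :
    ∀ (rows : List (List (List (String × Int)))) (s : Nat) (G : List (List (List (String × Int)))),
    (∀ r ∈ rows, r.length ≤ m) → G.length = m → (∀ r ∈ G, r.length = n) →
    (∀ p c, p < m → s ≤ c → (G.getD p []).getD c [] = []) →
    s + rows.length ≤ n →
    (PySem.List.enumerate rows (s : Int)).foldl
      (fun grid p => if fj then
          grid.take (m - p.2.length)
            ++ List.zipWith (fun v r => r.set ((p.1 : Int)).toNat v) p.2.reverse (grid.drop (m - p.2.length))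
        else
          List.zipWith (fun v r => r.set ((p.1 : Int)).toNat v) p.2 grid ++ grid.drop p.2.length) G
    = (List.range m).map (fun p =>
        (G.getD p []).take s
        ++ rows.map (fun r => midv fj m r p)
        ++ (G.getD p []).drop (s + rows.length)) := by
  intro rows
  induction rows with
  | nil =>
    intro s G _ hGm hGn _ _
    simp only [PySem.List.enumerate_nil, List.foldl_nil, List.map_nil, List.length_nil,
      Nat.add_zero, List.append_nil, List.nil_append, List.take_append_drop]
    exact (range_map_getD G m hGm).symm
  | cons row rows ih =>
    intro s G hrows hGm hGn hblank hsn
    have hrowm : row.length ≤ m := hrows row (by simp)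
    have hs : s < n := by simp at hsn; omega
    rw [PySem.List.enumerate_cons]
    simp only [List.foldl_cons]
    set G' := (if fj then
        G.take (m - row.length)
          ++ List.zipWith (fun v r => r.set ((s : Int)).toNat v) row.reverse (G.drop (m - row.length))
      else
        List.zipWith (fun v r => r.set ((s : Int)).toNat v) row G ++ G.drop row.length) with hG'
    obtain ⟨hG'm, hG'n⟩ := colstep_shape fj m n (s : Int) row hrowm G hGm hGn
    have hget : ∀ (p : Nat), p < m → G'.getD p [] = (G.getD p []).set s (midv fj m row p) := by
      intro p hp
      have := colstep_getD fj m n (s : Int) (by omega) (by simp; omega) row hrowm G hGm hGn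
        (fun p hp => hblank p s hp (le_refl s)) p hp
      simpa using this
    have hblank' : ∀ p c, p < m → s + 1 ≤ c → (G'.getD p []).getD c [] = [] := by
      intro p c hp hc
      rw [hget p hp, getD_set_ne _ _ _ _ _ (by omega)]
      exact hblank p c hp (by omega)
    have hcast : ((s : Int) + 1) = ((s + 1 : Nat) : Int) := by push_cast; ring
    rw [hcast, ih (s+1) G' (fun r hr => hrows r (by simp [hr])) hG'm hG'n hblank' (by simp at hsn ⊢; omega)]
    apply List.map_congr_left
    intro p hp
    rw [List.mem_range] at hp
    have hGp : (G.getD p []).length = n := by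
      apply hGn
      rw [List.getD_eq_getElem _ _ (by omega)]
      exact List.getElem_mem _
    rw [hget p hp]
    have h1 : ((G.getD p []).set s (midv fj m row p)).take (s+1)
        = (G.getD p []).take s ++ [midv fj m row p] := set_take_succ _ _ _ (by omega)
    have h2 : ((G.getD p []).set s (midv fj m row p)).drop (s+1+rows.length)
        = (G.getD p []).drop (s+1+rows.length) := by
      rw [List.drop_set]; simp; omega
    have hlen : s + 1 + rows.length = s + (rows.length + 1) := by omega
    rw [h1, h2, hlen]
    simp [List.append_assoc]

-- outer loop of A, swap, flip_i = true
theorem zipfold_rev (fj : Bool) (m n : Nat) :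
    ∀ (rows : List (List (List (String × Int)))) (s : Nat) (G : List (List (List (String × Int)))),
    (∀ r ∈ rows, r.length ≤ m) → G.length = m → (∀ r ∈ G, r.length = n) →
    (∀ p c, p < m → c < n - s → (G.getD p []).getD c [] = []) →
    s + rows.length ≤ n →
    (PySem.List.enumerate rows (s : Int)).foldl
      (fun grid p => if fj then
          grid.take (m - p.2.length)
            ++ List.zipWith (fun v r => r.set ((n : Int) - 1 - p.1).toNat v) p.2.reverse (grid.drop (m - p.2.length))
        else
          List.zipWith (fun v r => r.set ((n : Int) - 1 - p.1).toNat v) p.2 grid ++ grid.drop p.2.length) G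
    = (List.range m).map (fun p =>
        (G.getD p []).take (n - s - rows.length)
        ++ (rows.map (fun r => midv fj m r p)).reverse
        ++ (G.getD p []).drop (n - s)) := by
  intro rows
  induction rows with
  | nil =>
    intro s G _ hGm hGn _ _
    simp only [PySem.List.enumerate_nil, List.foldl_nil, List.map_nil, List.length_nil,
      Nat.sub_zero, List.reverse_nil, List.append_nil, List.nil_append, List.take_append_drop]
    exact (range_map_getD G m hGm).symm
  | cons row rows ih =>
    intro s G hrows hGm hGn hblank hsn
    have hrowm : row.length ≤ m := hrows row (by simp)
    have hlen1 : s + (rows.length + 1) ≤ n := by simpa using hsn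
    set k := n - 1 - s with hk
    have hkk : ((n : Int) - 1 - (s : Int)).toNat = k := by omega
    rw [PySem.List.enumerate_cons]
    simp only [List.foldl_cons]
    set G' := (if fj then
        G.take (m - row.length)
          ++ List.zipWith (fun v r => r.set ((n : Int) - 1 - (s : Int)).toNat v) row.reverse (G.drop (m - row.length))
      else
        List.zipWith (fun v r => r.set ((n : Int) - 1 - (s : Int)).toNat v) row G ++ G.drop row.length) with hG'
    obtain ⟨hG'm, hG'n⟩ := colstep_shape fj m n ((n : Int) - 1 - (s : Int)) row hrowm G hGm hGn
    have hget : ∀ (p : Nat), p < m → G'.getD p [] = (G.getD p []).set k (midv fj m row p) := by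
      intro p hp
      have h := colstep_getD fj m n ((n : Int) - 1 - (s : Int)) (by omega) (by rw [hkk]; omega)
        row hrowm G hGm hGn (fun p hp => by rw [hkk]; exact hblank p k hp (by omega)) p hp
      rw [hG', h, hkk]
    have hblank' : ∀ p c, p < m → c < n - (s+1) → (G'.getD p []).getD c [] = [] := by
      intro p c hp hc
      rw [hget p hp, getD_set_ne _ _ _ _ _ (by omega)]
      exact hblank p c hp (by omega)
    have hcast : ((s : Int) + 1) = ((s + 1 : Nat) : Int) := by push_cast; ring
    rw [hcast, ih (s+1) G' (fun r hr => hrows r (by simp [hr])) hG'm hG'n hblank' (by omega)]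
    apply List.map_congr_left
    intro p hp
    rw [List.mem_range] at hp
    have hGp : (G.getD p []).length = n := by
      apply hGn
      rw [List.getD_eq_getElem _ _ (by omega)]
      exact List.getElem_mem _
    rw [hget p hp]
    set d := n - s - (rows.length + 1) with hd
    have hd1 : n - (s+1) - rows.length = d := by omega
    have hd3 : n - (s+1) = k := by omega
    have hns : n - s = k + 1 := by omega
    have hdropk : (G.getD p []).drop k = (G.getD p [])[k] :: (G.getD p []).drop (k+1) :=
      List.drop_eq_getElem_cons (by omega)
    have h1 : ((G.getD p []).set k (midv fj m row p)).take d = (G.getD p []).take d := by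
      rw [List.take_set, List.set_eq_of_length_le (by simp; omega)]
    have h2 : ((G.getD p []).set k (midv fj m row p)).drop k
        = midv fj m row p :: (G.getD p []).drop (k+1) := by
      rw [List.drop_set, if_neg (lt_irrefl k), hdropk]
      simp only [Nat.sub_self, List.set_cons_zero]
    rw [hd1, hd3, h1, h2, hns]
    simp only [List.map_cons, List.reverse_cons, List.append_assoc, List.cons_append,
      List.nil_append]
    have hfix : k + 1 - (row :: rows).length = d := by simp; omega
    rw [hfix]

-- outer loop of A, swap: each step is a whole-column update
theorem outer_swap (fi fj : Bool) (m n : Nat)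
    (rows : List (List (List (String × Int)))) (s : Nat) (G : List (List (List (String × Int))))
    (hrows : ∀ r ∈ rows, r.length ≤ m) (hGm : G.length = m) (hGn : ∀ r ∈ G, r.length = n)
    (hsn : s + rows.length ≤ n) :
    (PySem.List.enumerate rows (s : Int)).foldl
      (fun grid p => (PySem.List.enumerate p.2).foldl
        (fun grid q => pySetCell grid
          (if fj then (m : Int) - 1 - q.1 else q.1)
          (if fi then (n : Int) - 1 - p.1 else p.1) q.2) grid) G
    = (PySem.List.enumerate rows (s : Int)).foldl
      (fun grid p => if fj then
          grid.take (m - p.2.length)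
            ++ List.zipWith (fun v r => r.set (if fi then (n : Int) - 1 - p.1 else p.1).toNat v) p.2.reverse (grid.drop (m - p.2.length))
        else
          List.zipWith (fun v r => r.set (if fi then (n : Int) - 1 - p.1 else p.1).toNat v) p.2 grid ++ grid.drop p.2.length) G := by
  apply foldl_hom_of_inv (fun G => G.length = m ∧ ∀ r ∈ G, r.length = n) _ _ _ G ⟨hGm, hGn⟩
  · intro g x hx hg
    obtain ⟨hg1, hg2⟩ := hg
    rw [PySem.List.mem_enumerate_iff] at hx
    obtain ⟨k, hk, rfl⟩ := hx
    exact colstep_shape fj m n _ rows[k] (hrows _ (List.getElem_mem hk)) g hg1 hg2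
  · intro g x hx hg
    obtain ⟨hg1, hg2⟩ := hg
    rw [PySem.List.mem_enumerate_iff] at hx
    obtain ⟨k, hk, rfl⟩ := hx
    have hC : 0 ≤ (if fi then (n : Int) - 1 - ((s : Int) + k) else (s : Int) + k) := by
      cases fi <;> simp <;> omega
    exact inner_swap fj m _ hC rows[k] (hrows _ (List.getElem_mem hk)) g hg1

-- zip(*g) of a nonempty rectangular grid is the m-column transpose
theorem pyZipT_rect (g : List (List (List (String × Int)))) (m : Nat)
    (hne : g ≠ []) (hrect : ∀ r ∈ g, r.length = m) :
    pyZipT g = (List.range m).map (fun q => g.map (fun row => row.getD q [])) := by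
  cases g with
  | nil => simp at hne
  | cons r rs =>
    have hr : r.length = m := hrect r (by simp)
    simp only [pyZipT]
    rw [hr, minfold_const m rs (fun x hx => hrect x (by simp [hx]))]

-- B's normalized (optionally reversed) row, read at column p
theorem trnorm_getD (fj : Bool) (r : List (List (String × Int))) (m p : Nat)
    (hr : r.length ≤ m) (hp : p < m) :
    (if fj then (r.take m ++ List.replicate (m - r.length) ([] : List (String × Int))).reverse
     else r.take m ++ List.replicate (m - r.length) ([] : List (String × Int))).getD p []
    = midv fj m r p := by
  have hnl : (r.take m ++ List.replicate (m - r.length) ([] : List (String × Int))).length = m :=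
    norm_length r m hr
  cases fj
  · simp only [Bool.false_eq_true, if_false, midv]
    exact norm_getD r m p hr hp
  · simp only [if_true, midv]
    rw [List.getD_eq_getElem?_getD, List.getElem?_reverse (by rw [hnl]; omega), hnl,
      ← List.getD_eq_getElem?_getD]
    exact norm_getD r m (m - 1 - p) hr (by omega)

-- A's patch of a blank row is B's normalized (optionally reversed) row
theorem rowPatch_replicate (fj : Bool) (m : Nat) (row : List (List (String × Int)))
    (hr : row.length ≤ m) :
    rowPatch fj m row (List.replicate m ([] : List (String × Int)))
    = (if fj then (row.take m ++ List.replicate (m - row.length) ([] : List (String × Int))).reverse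
       else row.take m ++ List.replicate (m - row.length) ([] : List (String × Int))) := by
  rw [List.take_of_length_le hr]
  cases fj
  · simp [rowPatch, List.drop_replicate]
  · simp only [if_true, rowPatch, List.reverse_append, List.reverse_replicate,
      List.take_replicate]
    congr 2
    omega

-- ===== VERDICT (by name: the statement is the Claim_ definition above) =====

theorem flip_stones_py_spec : Claim_equal_flip_stones_py := by
  intro stones fs hdom hpre
  obtain ⟨fi, fj, sw⟩ := fs
  unfold Spec_flip_stones_py
  unfold Pre_flip_stones_py at hpre
  cases sw
  · -- no swap
    simp only [flip_stones_py, flip_stones_py_alt, Bool.false_eq_true, if_false,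
      Int.toNat_natCast]
    have HO := outer_noswap fi fj (stones.headD []).length stones.length stones 0
      (List.replicate stones.length (List.replicate (stones.headD []).length []))
      hpre (by intro r hr; rw [List.eq_of_mem_replicate hr]; simp) (by simp) (by simp)
    rw [Nat.cast_zero] at HO
    rw [HO]
    have hmid : ∀ (src : List (List (List (String × Int)))),
        src.length = stones.length → (∀ r ∈ src, r.length ≤ (stones.headD []).length) →
        List.zipWith (fun v r => rowPatch fj (stones.headD []).length v r) src
          (List.replicate stones.length (List.replicate (stones.headD []).length []))
        = src.map (fun row =>
            if fj then (row.take (stones.headD []).length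
                ++ List.replicate ((stones.headD []).length - row.length) []).reverse
            else row.take (stones.headD []).length
                ++ List.replicate ((stones.headD []).length - row.length) []) := by
      intro src hlen hsrc
      rw [zipWith_replicate_right _ src _ _ (by omega)]
      apply List.map_congr_left
      intro r hr
      exact rowPatch_replicate fj _ r (hsrc r hr)
    cases fi
    · simp only [Bool.false_eq_true, if_false]
      rw [List.take_zero, List.drop_zero, List.nil_append, Nat.zero_add,
        List.drop_replicate, Nat.sub_self, List.replicate_zero, List.append_nil]
      rw [hmid stones rfl hpre]
      cases fj <;> simp [List.map_map]
    · simp only [if_true]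
      rw [Nat.sub_zero, Nat.sub_self, List.take_zero, List.nil_append,
        List.drop_zero, List.drop_replicate, Nat.sub_self, List.replicate_zero,
        List.append_nil]
      rw [hmid stones.reverse (by simp) (by intro r hr; exact hpre r (List.mem_reverse.mp hr))]
      cases fj <;> simp [List.map_map, List.map_reverse]
  · -- swap
    simp only [flip_stones_py, flip_stones_py_alt, if_true, Int.toNat_natCast]
    have HO := outer_swap fi fj (stones.headD []).length stones.length stones 0
      (List.replicate (stones.headD []).length (List.replicate stones.length []))
      hpre (by simp) (by intro r hr; rw [List.eq_of_mem_replicate hr]; simp) (by simp)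
    rw [Nat.cast_zero] at HO
    rw [HO]
    have hinitget : ∀ p, p < (stones.headD []).length →
        ((List.replicate (stones.headD []).length (List.replicate stones.length
          ([] : List (String × Int)))).getD p []) = List.replicate stones.length [] := by
      intro p hp
      rw [List.getD_eq_getElem _ _ (by simpa using hp), List.getElem_replicate]
    have hblank : ∀ p c, p < (stones.headD []).length →
        (((List.replicate (stones.headD []).length (List.replicate stones.length
          ([] : List (String × Int)))).getD p []).getD c []) = [] := by
      intro p c hp
      rw [hinitget p hp, getD_replicate_self]
    have hBrows : ∀ (src : List (List (List (String × Int)))),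
        (∀ y ∈ src, y.length ≤ (stones.headD []).length) →
        ∀ r ∈ ((if fj then
          (src.map (fun row => row.take (stones.headD []).length
              ++ List.replicate ((stones.headD []).length - row.length) [])).map (fun row => row.reverse)
        else src.map (fun row => row.take (stones.headD []).length
              ++ List.replicate ((stones.headD []).length - row.length) [])) : List (List (List (String × Int)))),
        r.length = (stones.headD []).length := by
      intro src hsrc r hr
      have hmem : ∀ x ∈ src.map (fun row =>
          row.take (stones.headD []).length
            ++ List.replicate ((stones.headD []).length - row.length) ([] : List (String × Int))),
          x.length = (stones.headD []).length := by
        intro x hx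
        rw [List.mem_map] at hx
        obtain ⟨y, hy, rfl⟩ := hx
        exact norm_length y _ (hsrc y hy)
      cases fj
      · simp only [Bool.false_eq_true, if_false] at hr
        exact hmem r hr
      · simp only [if_true] at hr
        rw [List.mem_map] at hr
        obtain ⟨x, hx, rfl⟩ := hr
        rw [List.length_reverse]
        exact hmem x hx
    have hBget : ∀ (src : List (List (List (String × Int)))),
        (∀ y ∈ src, y.length ≤ (stones.headD []).length) →
        ∀ (p : Nat), p < (stones.headD []).length →
        ((if fj then
          (src.map (fun row => row.take (stones.headD []).length
              ++ List.replicate ((stones.headD []).length - row.length) [])).map (fun row => row.reverse)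
        else src.map (fun row => row.take (stones.headD []).length
              ++ List.replicate ((stones.headD []).length - row.length) [])) : List (List (List (String × Int)))).map
          (fun row => row.getD p [])
        = src.map (fun r => midv fj (stones.headD []).length r p) := by
      intro src hsrc p hp
      cases fj
      · simp only [Bool.false_eq_true, if_false, List.map_map]
        apply List.map_congr_left
        intro y hy
        have := trnorm_getD false y (stones.headD []).length p (hsrc y hy) hp
        simpa using this
      · simp only [if_true, List.map_map]
        apply List.map_congr_left
        intro y hy
        have := trnorm_getD true y (stones.headD []).length p (hsrc y hy) hp
        simpa using this
    have hsrcrev : ∀ y ∈ stones.reverse, y.length ≤ (stones.headD []).length := by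
      intro y hy; exact hpre y (List.mem_reverse.mp hy)
    cases fi
    · simp only [Bool.false_eq_true, if_false]
      have HZ := zipfold_id fj (stones.headD []).length stones.length stones 0
        (List.replicate (stones.headD []).length (List.replicate stones.length []))
        hpre (by simp) (by intro r hr; rw [List.eq_of_mem_replicate hr]; simp)
        (fun p c hp _ => hblank p c hp) (by simp)
      rw [Nat.cast_zero] at HZ
      rw [HZ]
      cases hst : stones with
      | nil =>
        simp [pyZipT]
      | cons r rs =>
        rw [← hst]
        have hm0 : stones.headD [] = r := by rw [hst]; rfl
        rw [pyZipT_rect _ (stones.headD []).length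
          (by cases fj <;> simp [hst]) (hBrows stones hpre)]
        apply List.map_congr_left
        intro p hp
        rw [List.mem_range] at hp
        rw [hinitget p hp, List.take_zero, List.nil_append, Nat.zero_add,
          List.drop_replicate, Nat.sub_self, List.replicate_zero, List.append_nil]
        exact (hBget stones hpre p hp).symm
    · simp only [if_true]
      have HZ := zipfold_rev fj (stones.headD []).length stones.length stones 0
        (List.replicate (stones.headD []).length (List.replicate stones.length []))
        hpre (by simp) (by intro r hr; rw [List.eq_of_mem_replicate hr]; simp)
        (fun p c hp _ => hblank p c hp) (by simp)
      rw [Nat.cast_zero] at HZ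
      rw [HZ]
      cases hst : stones with
      | nil =>
        simp [pyZipT]
      | cons r rs =>
        rw [← hst]
        rw [pyZipT_rect _ (stones.headD []).length
          (by cases fj <;> simp [hst]) (hBrows stones.reverse hsrcrev)]
        apply List.map_congr_left
        intro p hp
        rw [List.mem_range] at hp
        rw [hinitget p hp, Nat.sub_zero, Nat.sub_self, List.take_zero, List.nil_append,
          List.drop_replicate, Nat.sub_self, List.replicate_zero, List.append_nil]
        rw [hBget stones.reverse hsrcrev p hp, List.map_reverse]
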